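-- pv_equiv track=rewrite | github.com/jjina-kkom/3AIM-seq | other/Poly(A)_Length_Measurement_byBaseCalls.py | count_mutations_withoutL
-- ===== SOURCE A (Python) =====
-- def count_mutations_withoutL(seq, homopolymer_base):
--         homopolymer_len = 0
--         point = 0
--         for base in seq:
--             point += 1
--             if base == homopolymer_base:
--                 homopolymer_len += 1
--             else:
--                 if point < 10:
--                     seq_window = seq[:10]
--                     mutCount = sum(base != homopolymer_base for base in seq_window)
--                     if mutCount > 1:
--                         break
--                     else:
--                         homopolymer_len += 1
--                         continue
--                 else:
--                     seq_window = seq[point-10:point]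
--                     mutCount = sum(base != homopolymer_base for base in seq_window)
--                     if mutCount > 1:
--                         break
--                     else:
--                         homopolymer_len += 1
--                         continue
--         return homopolymer_len
-- ===== SOURCE B (Python) =====
-- def count_mutations_withoutL(seq, homopolymer_base):
--     # prefix table: M[i] = number of mismatches among seq[:i]
--     M = [0]
--     for b in seq:
--         M.append(M[-1] + (b != homopolymer_base))
--     n = len(seq)
--     homopolymer_len = 0
--     for point, b in enumerate(seq, 1):
--         if b == homopolymer_base:
--             homopolymer_len += 1
--         else:
--             mut = M[min(10, n)] if point < 10 else M[point] - M[point - 10]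
--             if mut > 1:
--                 break
--             homopolymer_len += 1
--     return homopolymer_len
-- ===== Notes on version B (the rewrite author's own statement) =====
-- stated objective: alternative
-- what changed: B precomputes a mismatch prefix-sum table once and answers each window query by a difference of two table entries, instead of re-scanning and summing a 10-character slice at every mismatch as A does.
import Mathlib
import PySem

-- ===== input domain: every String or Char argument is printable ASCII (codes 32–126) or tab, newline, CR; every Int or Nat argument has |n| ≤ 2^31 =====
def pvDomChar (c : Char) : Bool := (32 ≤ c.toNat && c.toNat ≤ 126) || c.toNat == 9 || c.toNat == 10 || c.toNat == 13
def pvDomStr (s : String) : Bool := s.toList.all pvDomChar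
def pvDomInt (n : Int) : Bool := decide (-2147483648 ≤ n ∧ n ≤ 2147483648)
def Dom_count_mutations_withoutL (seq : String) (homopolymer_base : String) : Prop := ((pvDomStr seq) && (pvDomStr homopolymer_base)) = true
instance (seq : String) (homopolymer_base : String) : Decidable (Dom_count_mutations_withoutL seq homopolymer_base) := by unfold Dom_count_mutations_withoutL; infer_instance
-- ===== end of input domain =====

-- B replaces A's per-mismatch 10-character window re-scan by a mismatch prefix-sum table
-- queried via a difference of two entries (alternative decomposition, same asymptotic cost).


-- ===== PORT A =====
-- `base != homopolymer_base` for a single character `base` of the sequence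
def pvMis (h : String) (c : Char) : Bool := String.ofList [c] != h

-- sum(base != homopolymer_base for base in seq_window)
def pvA_mutCount (h : String) (w : List Char) : Int :=
  w.foldl (fun acc b => acc + (if pvMis h b then 1 else 0)) 0

-- the for-loop of A: `full` is the whole sequence (for the slices), point/len the loop state
def pvA_loop (full : List Char) (h : String) : List Char → Nat → Int → Int
  | [], _, len => len
  | c :: rest, point, len =>
    let point' := point + 1
    if String.ofList [c] == h then
      pvA_loop full h rest point' (len + 1)
    else if point' < 10 then
      let w := PySem.List.slice full (some ((0 : Nat) : Int)) (some ((10 : Nat) : Int))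
      if pvA_mutCount h w > 1 then len else pvA_loop full h rest point' (len + 1)
    else
      let w := PySem.List.slice full (some ((point' - 10 : Nat) : Int)) (some ((point' : Nat) : Int))
      if pvA_mutCount h w > 1 then len else pvA_loop full h rest point' (len + 1)

def count_mutations_withoutL (seq : String) (homopolymer_base : String) : Int :=
  pvA_loop seq.toList homopolymer_base seq.toList 0 0

-- ===== PORT B =====
-- M = [0]; for b in seq: M.append(M[-1] + (b != homopolymer_base))
def pvB_M (h : String) (l : List Char) : List Int :=
  l.foldl (fun M b => M ++ [PySem.List.pyGetD M (-1) 0 + (if pvMis h b then 1 else 0)]) [0]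

-- the for-loop of B over enumerate(seq, 1); `point` is the current 1-based index
def pvB_loop (M : List Int) (n : Nat) (h : String) : List Char → Nat → Int → Int
  | [], _, len => len
  | c :: rest, point, len =>
    if String.ofList [c] == h then
      pvB_loop M n h rest (point + 1) (len + 1)
    else
      let mcount : Int :=
        if point < 10 then PySem.List.pyGetD M ((min 10 n : Nat) : Int) 0
        else PySem.List.pyGetD M ((point : Nat) : Int) 0 - PySem.List.pyGetD M ((point - 10 : Nat) : Int) 0
      if mcount > 1 then len else pvB_loop M n h rest (point + 1) (len + 1)

def count_mutations_withoutL_alt (seq : String) (homopolymer_base : String) : Int :=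
  let l := seq.toList
  pvB_loop (pvB_M homopolymer_base l) l.length homopolymer_base l 1 0

-- ===== PRECONDITION & SPEC =====
def Spec_count_mutations_withoutL (seq : String) (homopolymer_base : String) (out : Int) : Prop := out = count_mutations_withoutL_alt seq homopolymer_base
instance (seq : String) (homopolymer_base : String) (out : Int) : Decidable (Spec_count_mutations_withoutL seq homopolymer_base out) := by unfold Spec_count_mutations_withoutL; infer_instance

-- ===== CLAIM (what is proved, stated in full; the proofs are below) =====
def Claim_equal_count_mutations_withoutL : Prop := ∀ (seq : String) (homopolymer_base : String), Dom_count_mutations_withoutL seq homopolymer_base → Spec_count_mutations_withoutL seq homopolymer_base (count_mutations_withoutL seq homopolymer_base)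

-- ===== LEMMAS AND PROOFS =====

-- A's window sum is the (cast) mismatch count of the window
theorem pvA_mutCount_eq_countP (h : String) (w : List Char) :
    pvA_mutCount h w = (w.countP (pvMis h) : Int) := by
  have gen : ∀ (w : List Char) (a : Int),
      w.foldl (fun acc b => acc + (if pvMis h b then 1 else 0)) a = a + (w.countP (pvMis h) : Int) := by
    intro w
    induction w with
    | nil => intro a; simp
    | cons c rest ih =>
      intro a
      simp only [List.foldl_cons, List.countP_cons, ih]
      by_cases hc : pvMis h c <;> simp [hc, Int.add_comm, Int.add_left_comm]
  simpa [pvA_mutCount] using gen w 0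

-- B's table-building fold is the prefix-count table
theorem pvB_M_eq (h : String) (l : List Char) :
    pvB_M h l = (List.range (l.length + 1)).map (fun i => ((l.take i).countP (pvMis h) : Int)) := by
  have gen : ∀ (l : List Char) (P : List Int) (a : Int),
      l.foldl (fun M b => M ++ [PySem.List.pyGetD M (-1) 0 + (if pvMis h b then 1 else 0)]) (P ++ [a])
        = P ++ (List.range (l.length + 1)).map (fun i => a + ((l.take i).countP (pvMis h) : Int)) := by
    intro l
    induction l with
    | nil => intro P a; simp [List.range_succ]
    | cons c rest ih =>
      intro P a
      simp only [List.foldl_cons]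
      rw [PySem.List.pyGetD_neg_one_append_singleton]
      have := ih (P ++ [a]) (a + (if pvMis h c then 1 else 0))
      rw [show (P ++ [a]) ++ [a + (if pvMis h c then 1 else 0)]
            = (P ++ [a]) ++ [a + (if pvMis h c then 1 else 0)] from rfl, this]
      rw [List.append_assoc]
      congr 1
      -- [a] ++ map over range(n+1) of shifted counts = map over range(n+2) of counts of (c::rest)
      apply List.ext_getElem
      · simp [List.range_succ]
      · intro i h1 h2
        simp only [List.length_append, List.length_map, List.length_range, List.length_cons] at h1 h2
        rcases Nat.eq_zero_or_pos i with hi | hi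
        · subst hi; simp
        · obtain ⟨j, rfl⟩ := Nat.exists_eq_add_of_le hi
          simp only [List.getElem_append_right (by simp : ([a] : List Int).length ≤ 1 + j),
            List.getElem_map, List.getElem_range, List.length_singleton]
          have : 1 + j - 1 = j := by omega
          rw [this]
          have : (1 + j) = j + 1 := by omega
          rw [this]
          simp only [List.take_succ_cons, List.countP_cons]
          by_cases hc : pvMis h c <;> simp [hc, Int.add_comm, Int.add_left_comm]
  have := gen l [] 0
  simp only [List.nil_append] at this
  simpa [pvB_M] using this

-- reading the table at i ≤ n
theorem pvB_M_getD (h : String) (l : List Char) (i : Nat) (hi : i ≤ l.length) :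
    PySem.List.pyGetD (pvB_M h l) ((i : Nat) : Int) 0 = ((l.take i).countP (pvMis h) : Int) := by
  rw [PySem.List.pyGetD_natCast, pvB_M_eq]
  rw [List.getD_eq_getElem?_getD, List.getElem?_map, List.getElem?_range (by omega : i < l.length + 1)]
  rfl

-- mismatch count over a drop/take window as a difference of prefix counts
theorem countP_window (p : Char → Bool) (l : List Char) (a b : Nat) (hab : a ≤ b) :
    (((l.drop a).take (b - a)).countP p : Int)
      = ((l.take b).countP p : Int) - ((l.take a).countP p : Int) := by
  have h1 : (l.take b) = l.take a ++ ((l.drop a).take (b - a)) := by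
    rw [← List.take_append_drop a (l.take b)]
    congr 1
    · rw [List.take_take, min_eq_left hab]
    · rw [List.drop_take]
  rw [h1, List.countP_append]
  push_cast
  ring

-- the two loops agree in lockstep: A at 0-based processed-count k, B at 1-based point k+1
theorem loops_eq (h : String) (l : List Char) :
    ∀ (rest : List Char) (k : Nat) (len : Int), l.drop k = rest →
      pvA_loop l h rest k len = pvB_loop (pvB_M h l) l.length h rest (k + 1) len := by
  intro rest
  induction rest with
  | nil => intro k len _; simp [pvA_loop, pvB_loop]
  | cons c tail ih =>
    intro k len hdrop
    have hk : k < l.length := by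
      by_contra hk
      rw [List.drop_eq_nil_of_le (by omega)] at hdrop
      exact (List.cons_ne_nil c tail) hdrop.symm
    have hdrop' : l.drop (k + 1) = tail := by
      have : l.drop (k + 1) = (l.drop k).drop 1 := by rw [List.drop_drop]
      rw [this, hdrop]; rfl
    simp only [pvA_loop, pvB_loop]
    by_cases hm : (String.ofList [c] == h) = true
    · rw [if_pos hm, if_pos hm]
      exact ih (k + 1) (len + 1) hdrop'
    · rw [if_neg hm, if_neg hm]
      by_cases hlt : k + 1 < 10
      · -- early window: seq[:10]; its count = M[min 10 n]
        have hw : pvA_mutCount h (PySem.List.slice l (some ((0 : Nat) : Int)) (some ((10 : Nat) : Int)))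
            = PySem.List.pyGetD (pvB_M h l) ((min 10 l.length : Nat) : Int) 0 := by
          rw [PySem.List.slice_natCast, pvA_mutCount_eq_countP,
            pvB_M_getD h l _ (min_le_right 10 l.length)]
          have ht : l.take (min 10 l.length) = l.take 10 := by
            rw [← List.take_length (l := l), List.take_take]
            simp
          rw [List.drop_zero, ht]
        rw [if_pos hlt, if_pos hlt, hw]
        by_cases hbig : PySem.List.pyGetD (pvB_M h l) ((min 10 l.length : Nat) : Int) 0 > 1
        · rw [if_pos hbig, if_pos hbig]
        · rw [if_neg hbig, if_neg hbig]
          exact ih (k + 1) (len + 1) hdrop'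
      · -- main window: seq[point-10:point]
        have hw : pvA_mutCount h (PySem.List.slice l (some ((k + 1 - 10 : Nat) : Int)) (some ((k + 1 : Nat) : Int)))
            = PySem.List.pyGetD (pvB_M h l) ((k + 1 : Nat) : Int) 0
              - PySem.List.pyGetD (pvB_M h l) ((k + 1 - 10 : Nat) : Int) 0 := by
          rw [PySem.List.slice_natCast, pvA_mutCount_eq_countP,
            pvB_M_getD h l _ (by omega), pvB_M_getD h l _ (by omega)]
          exact countP_window (pvMis h) l (k + 1 - 10) (k + 1) (by omega)
        rw [if_neg hlt, if_neg hlt, hw]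
        by_cases hbig : PySem.List.pyGetD (pvB_M h l) ((k + 1 : Nat) : Int) 0
              - PySem.List.pyGetD (pvB_M h l) ((k + 1 - 10 : Nat) : Int) 0 > 1
        · rw [if_pos hbig, if_pos hbig]
        · rw [if_neg hbig, if_neg hbig]
          exact ih (k + 1) (len + 1) hdrop'

-- ===== VERDICT (by name: the statement is the Claim_ definition above) =====
theorem count_mutations_withoutL_spec : Claim_equal_count_mutations_withoutL := by
  intro seq h _
  unfold Spec_count_mutations_withoutL count_mutations_withoutL count_mutations_withoutL_alt
  exact loops_eq h seq.toList seq.toList 0 0 rfl
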